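-- pv_equiv track=rewrite | github.com/defai-digital/ax-engine | scripts/update_readme_from_bench.py | find_anchor_line
-- ===== SOURCE A (Python) =====
-- def find_anchor_line(lines: list[str], model_name: str, quant: str, section_header: str) -> int:
--     """Find the pt=128 table row for (model_name, quant) within the named section."""
--     in_target = False
--     for i, line in enumerate(lines):
--         if line.startswith("### ") and section_header in line:
--             in_target = True
--         elif line.startswith("### ") and in_target:
--             break
--         if not in_target:
--             continue
--         if model_name in line and quant in line and "| 128 |" in line:
--             return i
--     return -1
-- ===== SOURCE B (Python) =====
-- def find_anchor_line(lines: list[str], model_name: str, quant: str, section_header: str) -> int: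
--     """Find the pt=128 table row for (model_name, quant) within the named section."""
--     start = next((i for i, l in enumerate(lines)
--                   if l.startswith("### ") and section_header in l), None)
--     if start is None:
--         return -1
--     end = next((j for j in range(start + 1, len(lines))
--                 if lines[j].startswith("### ") and section_header not in lines[j]),
--                len(lines))
--     for i in range(start, end):
--         line = lines[i]
--         if model_name in line and quant in line and "| 128 |" in line:
--             return i
--     return -1
-- ===== Notes on version B (the rewrite author's own statement) =====
-- stated objective: alternative
-- what changed: Replaces A's single scan carrying an in_target flag (with the first-if-shadows-elif subtlety) by an explicit three-phase decomposition: locate the section start, locate the section end (the next '### ' header lacking section_header), then scan only that line range for the row.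
import Mathlib
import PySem

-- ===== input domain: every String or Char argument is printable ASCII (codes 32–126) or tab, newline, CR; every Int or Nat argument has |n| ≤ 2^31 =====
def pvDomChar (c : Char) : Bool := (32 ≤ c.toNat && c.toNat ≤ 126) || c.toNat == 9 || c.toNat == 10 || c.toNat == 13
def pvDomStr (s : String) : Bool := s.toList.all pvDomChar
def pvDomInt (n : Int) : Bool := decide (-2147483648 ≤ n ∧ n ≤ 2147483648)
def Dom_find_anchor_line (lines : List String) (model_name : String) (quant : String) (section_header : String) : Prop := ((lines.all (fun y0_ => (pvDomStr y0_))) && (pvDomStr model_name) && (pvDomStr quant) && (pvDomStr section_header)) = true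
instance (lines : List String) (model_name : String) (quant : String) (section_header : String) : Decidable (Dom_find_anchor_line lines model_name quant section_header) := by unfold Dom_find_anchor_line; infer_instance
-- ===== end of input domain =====

-- B replaces A's single scan with a stateful flag by an explicit three-phase
-- decomposition (find section start, find section end, scan that range);
-- same cost, plainer structure (objective: alternative/simpler).

-- ===== PORT A =====
-- one loop over enumerate(lines) carrying the in_target flag; early return → Int result
def find_anchor_go (mn q sh : String) : List String → Nat → Bool → Int
  | [], _, _ => -1
  | l :: rest, i, it =>
    if PySem.Str.startswith l "### " && PySem.Str.isIn sh l then
      -- in_target := true, then fall through to the row check (it = true)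
      (if PySem.Str.isIn mn l && PySem.Str.isIn q l && PySem.Str.isIn "| 128 |" l then (i : Int)
       else find_anchor_go mn q sh rest (i+1) true)
    else if PySem.Str.startswith l "### " && it then
      -1  -- break
    else
      (if it = false then find_anchor_go mn q sh rest (i+1) it  -- continue
       else if PySem.Str.isIn mn l && PySem.Str.isIn q l && PySem.Str.isIn "| 128 |" l then (i : Int)
       else find_anchor_go mn q sh rest (i+1) it)

def find_anchor_line (lines : List String) (model_name : String) (quant : String) (section_header : String) : Int :=
  find_anchor_go model_name quant section_header lines 0 false

-- ===== PORT B =====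
-- first index whose line starts the target section (None → none)
def alt_findStart (sh : String) : List String → Nat → Option Nat
  | [], _ => none
  | l :: rest, i =>
    if PySem.Str.startswith l "### " && PySem.Str.isIn sh l then some i
    else alt_findStart sh rest (i+1)

-- first index ≥ j whose line opens a DIFFERENT section (default: len(lines))
def alt_findEnd (sh : String) : List String → Nat → Nat
  | [], j => j
  | l :: rest, j =>
    if PySem.Str.startswith l "### " && !(PySem.Str.isIn sh l) then j
    else alt_findEnd sh rest (j+1)

-- the final for-loop over range(start, end)
def alt_scan (mn q : String) (e : Nat) : List String → Nat → Int
  | [], _ => -1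
  | l :: rest, i =>
    if e ≤ i then -1
    else if PySem.Str.isIn mn l && PySem.Str.isIn q l && PySem.Str.isIn "| 128 |" l then (i : Int)
    else alt_scan mn q e rest (i+1)

def find_anchor_line_alt (lines : List String) (model_name : String) (quant : String) (section_header : String) : Int :=
  match alt_findStart section_header lines 0 with
  | none => -1
  | some s =>
      alt_scan model_name quant (alt_findEnd section_header (lines.drop (s+1)) (s+1)) (lines.drop s) s

-- ===== PRECONDITION & SPEC =====
def Spec_find_anchor_line (lines : List String) (model_name : String) (quant : String) (section_header : String) (out : Int) : Prop := out = find_anchor_line_alt lines model_name quant section_header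
instance (lines : List String) (model_name : String) (quant : String) (section_header : String) (out : Int) : Decidable (Spec_find_anchor_line lines model_name quant section_header out) := by unfold Spec_find_anchor_line; infer_instance

-- ===== CLAIM (what is proved, stated in full; the proofs are below) =====
def Claim_equal_find_anchor_line : Prop := ∀ (lines : List String) (model_name : String) (quant : String) (section_header : String), Dom_find_anchor_line lines model_name quant section_header → Spec_find_anchor_line lines model_name quant section_header (find_anchor_line lines model_name quant section_header)

-- ===== LEMMAS AND PROOFS =====

lemma findEnd_ge (sh : String) : ∀ (ls : List String) (j : Nat), j ≤ alt_findEnd sh ls j := by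
  intro ls
  induction ls with
  | nil => intro j; simp [alt_findEnd]
  | cons l rest ih =>
    intro j
    simp only [alt_findEnd]
    split
    · exact le_refl _
    · exact le_trans (Nat.le_succ j) (ih (j+1))

lemma findStart_ge (sh : String) : ∀ (ls : List String) (i s : Nat),
    alt_findStart sh ls i = some s → i ≤ s := by
  intro ls
  induction ls with
  | nil => intro i s h; simp [alt_findStart] at h
  | cons l rest ih =>
    intro i s h
    simp only [alt_findStart] at h
    split at h
    · injection h with h'; omega
    · exact le_trans (Nat.le_succ i) (ih (i+1) s h)

lemma findStart_drop (sh : String) : ∀ (ls : List String) (i s : Nat),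
    alt_findStart sh ls i = some s →
    ∃ l rest, ls.drop (s - i) = l :: rest ∧
      (PySem.Str.startswith l "### " && PySem.Str.isIn sh l) = true := by
  intro ls
  induction ls with
  | nil => intro i s h; simp [alt_findStart] at h
  | cons l rest ih =>
    intro i s h
    simp only [alt_findStart] at h
    split at h
    · rename_i hc
      cases h
      exact ⟨l, rest, by simp, hc⟩
    · have hge := findStart_ge sh rest (i+1) s h
      obtain ⟨l', rest', hd, hc⟩ := ih (i+1) s h
      refine ⟨l', rest', ?_, hc⟩
      have : s - i = (s - (i+1)) + 1 := by omega
      rw [this, List.drop_succ_cons, hd]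

-- phase 2: A's loop with in_target = true equals B's bounded scan
lemma phase2 (mn q sh : String) : ∀ (ls : List String) (i : Nat),
    find_anchor_go mn q sh ls i true = alt_scan mn q (alt_findEnd sh ls i) ls i := by
  intro ls
  induction ls with
  | nil => intro i; simp [find_anchor_go, alt_scan]
  | cons l rest ih =>
    intro i
    have hne : ¬ (alt_findEnd sh rest (i+1)) ≤ i := by
      have := findEnd_ge sh rest (i+1); omega
    by_cases hsw : PySem.Chars.startswith l.toList ['#','#','#',' '] = true
    · by_cases hin : PySem.Chars.isIn sh.toList l.toList = true
      · simp [find_anchor_go, alt_findEnd, alt_scan, hsw, hin, hne, ih]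
      · simp [find_anchor_go, alt_findEnd, alt_scan, hsw, hin]
    · simp [find_anchor_go, alt_findEnd, alt_scan, hsw, hne, ih]

-- phase 1: A's loop with in_target = false skips to the first matching header
lemma phase1 (mn q sh : String) : ∀ (ls : List String) (i : Nat),
    find_anchor_go mn q sh ls i false =
      (match alt_findStart sh ls i with
       | none => -1
       | some s => find_anchor_go mn q sh (ls.drop (s - i)) s true) := by
  intro ls
  induction ls with
  | nil => intro i; simp [find_anchor_go, alt_findStart]
  | cons l rest ih =>
    intro i
    by_cases hsw : PySem.Chars.startswith l.toList ['#','#','#',' '] = true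
    · by_cases hin : PySem.Chars.isIn sh.toList l.toList = true
      · simp [find_anchor_go, alt_findStart, hsw, hin]
      · have hstep : find_anchor_go mn q sh (l :: rest) i false
            = find_anchor_go mn q sh rest (i+1) false := by
          simp [find_anchor_go, hsw, hin]
        have hfs : alt_findStart sh (l :: rest) i = alt_findStart sh rest (i+1) := by
          simp [alt_findStart, hsw, hin]
        rw [hstep, ih (i+1), hfs]
        cases h : alt_findStart sh rest (i+1) with
        | none => rfl
        | some s =>
          have hge := findStart_ge sh rest (i+1) s h
          have he : s - i = (s - (i+1)) + 1 := by omega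
          simp [he, List.drop_succ_cons]
    · have hstep : find_anchor_go mn q sh (l :: rest) i false
          = find_anchor_go mn q sh rest (i+1) false := by
        simp [find_anchor_go, hsw]
      have hfs : alt_findStart sh (l :: rest) i = alt_findStart sh rest (i+1) := by
        simp [alt_findStart, hsw]
      rw [hstep, ih (i+1), hfs]
      cases h : alt_findStart sh rest (i+1) with
      | none => rfl
      | some s =>
        have hge := findStart_ge sh rest (i+1) s h
        have he : s - i = (s - (i+1)) + 1 := by omega
        simp [he, List.drop_succ_cons]

-- ===== VERDICT (by name: the statement is the Claim_ definition above) =====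
theorem find_anchor_line_spec : Claim_equal_find_anchor_line := by
  intro lines mn q sh _
  unfold Spec_find_anchor_line find_anchor_line find_anchor_line_alt
  rw [phase1]
  cases h : alt_findStart sh lines 0 with
  | none => rfl
  | some s =>
    simp only [Nat.sub_zero]
    rw [phase2]
    obtain ⟨l, rest, hd, hc⟩ := findStart_drop sh lines 0 s h
    simp only [Nat.sub_zero] at hd
    have hdrop1 : lines.drop (s+1) = rest := by
      have : lines.drop (s+1) = (lines.drop s).drop 1 := by
        rw [List.drop_drop]
      rw [this, hd]; rfl
    rw [hd, hdrop1]
    have hinC : PySem.Chars.isIn sh.toList l.toList = true := by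
      have h2 := ((Bool.and_eq_true _ _).mp hc).2
      simpa using h2
    simp [alt_findEnd, hinC]
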